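-- pv_equiv track=rewrite | github.com/Interesting6/FuckLeetCode | 6.z-字形变换.py | convert
-- ===== SOURCE A (Python) =====
-- def convert(s: str, numRows: int) -> str:
--     if numRows < 2:
--         return s
--     res = ['' for _ in range(numRows)]
--     n = len(s)
--     ridx = 0
--     flag = 1
--     for c in s:
--         res[ridx] += c
--         ridx += flag
--         if ridx == numRows-1 or ridx == 0:
--             flag = -flag
--     return ''.join(res)
-- ===== SOURCE B (Python) =====
-- def convert(s: str, numRows: int) -> str:
--     if numRows < 2:
--         return s
--     n = len(s)
--     cycle = 2 * numRows - 2
--     chunks = []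
--     for r in range(numRows):
--         for k in range(r, n, cycle):
--             chunks.append(s[k])
--             j = k + cycle - 2 * r
--             if 0 < r < numRows - 1 and j < n:
--                 chunks.append(s[j])
--     return ''.join(chunks)
-- ===== Notes on version B (the rewrite author's own statement) =====
-- stated objective: alternative
-- what changed: B replaces A's per-character bounce simulation (mutable row index and direction flag) with direct row-by-row gathering: for each row it reads the straight-column characters at indices r, r+cycle, r+2*cycle, ... (cycle = 2*numRows-2) and interleaves the diagonal character at k+cycle-2*r for interior rows.
import Mathlib
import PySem

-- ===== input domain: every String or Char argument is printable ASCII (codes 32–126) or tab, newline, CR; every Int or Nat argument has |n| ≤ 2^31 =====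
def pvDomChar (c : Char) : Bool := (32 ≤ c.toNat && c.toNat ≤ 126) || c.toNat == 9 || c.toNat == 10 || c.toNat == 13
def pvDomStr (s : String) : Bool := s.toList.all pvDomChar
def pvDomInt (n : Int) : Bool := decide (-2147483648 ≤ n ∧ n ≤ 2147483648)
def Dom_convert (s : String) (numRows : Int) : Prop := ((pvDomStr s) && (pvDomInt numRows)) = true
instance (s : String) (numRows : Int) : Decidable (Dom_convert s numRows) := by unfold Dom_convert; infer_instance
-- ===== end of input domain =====

-- B gathers each zigzag row directly by period arithmetic (cycle = 2*numRows-2) instead of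
-- A's character-by-character bounce simulation; objective: alternative decomposition.

-- ===== PORT A =====
-- one iteration of A's loop: res[ridx] += c; ridx += flag; flip flag at the two boundary rows.
-- ridx stays within [0, numRows-1] throughout (the rowf-invariant proved below),
-- so indexing via .toNat / List.set / List.getD is exact for Python's res[ridx].
def stepA (numRows : Int) (st : List (List Char) × Int × Int) (ch : Char) :
    List (List Char) × Int × Int :=
  let res := st.1
  let ridx := st.2.1
  let flag := st.2.2
  let res' := res.set ridx.toNat (res.getD ridx.toNat [] ++ [ch])
  let ridx' := ridx + flag
  let flag' := if ridx' = numRows - 1 ∨ ridx' = 0 then -flag else flag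
  (res', ridx', flag')

def convert (s : String) (numRows : Int) : String :=
  if numRows < 2 then s
  else
    let res0 : List (List Char) := (List.range numRows.toNat).map (fun _ => [])
    let fin := s.toList.foldl (stepA numRows) (res0, 0, 1)
    String.ofList fin.1.flatten

-- ===== PORT B =====
-- body of B's inner loop over k in range(r, n, cycle); every index handed to pyGetD is in
-- [0, n), so the default character is never used.
def innerB (l : List Char) (numRows cycle r : Int) (acc : List Char) (k : Int) : List Char :=
  let acc := acc ++ [PySem.List.pyGetD l k ' ']
  let j := k + cycle - 2 * r
  if 0 < r ∧ r < numRows - 1 ∧ j < (l.length : Int) then acc ++ [PySem.List.pyGetD l j ' ']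
  else acc

def convert_alt (s : String) (numRows : Int) : String :=
  if numRows < 2 then s
  else
    let l := s.toList
    let cycle := 2 * numRows - 2
    let chunks := (PySem.List.pyRange 0 numRows 1).foldl
      (fun acc r =>
        (PySem.List.pyRange r (l.length : Int) cycle).foldl (innerB l numRows cycle r) acc)
      []
    String.ofList chunks

-- ===== PRECONDITION & SPEC =====
def Spec_convert (s : String) (numRows : Int) (out : String) : Prop := out = convert_alt s numRows
instance (s : String) (numRows : Int) (out : String) : Decidable (Spec_convert s numRows out) := by unfold Spec_convert; infer_instance

-- ===== CLAIM (what is proved, stated in full; the proofs are below) =====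
def Claim_equal_convert : Prop := ∀ (s : String) (numRows : Int), Dom_convert s numRows → Spec_convert s numRows (convert s numRows)

-- ===== LEMMAS AND PROOFS =====

-- closed-form row index of character i (period 2*N-2)
def rowf (N i : Nat) : Nat :=
  if i % (2*N-2) < N then i % (2*N-2) else (2*N-2) - i % (2*N-2)

-- closed-form direction flag before processing character i
def flagf (N i : Nat) : Int := if i % (2*N-2) < N - 1 then 1 else -1

-- the characters of row r among indices [k, length)
def tailf (l : List Char) (N k r : Nat) : List Char :=
  ((List.range' k (l.length - k)).filter (fun i => rowf N i = r)).map (fun i => l.getD i ' ')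

lemma rowf_lt (N i : Nat) (hN : 2 ≤ N) : rowf N i < N := by
  unfold rowf
  have h : i % (2*N-2) < 2*N-2 := Nat.mod_lt _ (by omega)
  split_ifs <;> omega

lemma rowf_zero (N : Nat) (hN : 2 ≤ N) : rowf N 0 = 0 := by
  unfold rowf; rw [Nat.zero_mod, if_pos (by omega)]

lemma flagf_zero (N : Nat) (hN : 2 ≤ N) : flagf N 0 = 1 := by
  unfold flagf; rw [Nat.zero_mod, if_pos (by omega)]

lemma succ_mod (k c : Nat) (hc : 2 ≤ c) :
    (k+1) % c = if k % c = c - 1 then 0 else k % c + 1 := by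
  have h1 : (k+1) % c = (k % c + 1) % c := by
    conv_lhs => rw [Nat.add_mod, Nat.mod_eq_of_lt (show 1 < c by omega)]
  have h2 : k % c < c := Nat.mod_lt _ (by omega)
  rw [h1]
  split_ifs with h
  · rw [h, Nat.sub_add_cancel (by omega), Nat.mod_self]
  · exact Nat.mod_eq_of_lt (by omega)

lemma step_row (N k : Nat) (hN : 2 ≤ N) :
    (rowf N (k+1) : Int) = (rowf N k : Int) + flagf N k := by
  have hm : k % (2*N-2) < 2*N-2 := Nat.mod_lt _ (by omega)
  have hs := succ_mod k (2*N-2) (by omega)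
  unfold rowf flagf
  rw [hs]
  split_ifs <;> push_cast <;> omega

lemma step_flag (N k : Nat) (hN : 2 ≤ N) :
    flagf N (k+1) =
      if (rowf N (k+1) : Int) = (N:Int) - 1 ∨ (rowf N (k+1) : Int) = 0 then -(flagf N k)
      else flagf N k := by
  have hm : k % (2*N-2) < 2*N-2 := Nat.mod_lt _ (by omega)
  have hs := succ_mod k (2*N-2) (by omega)
  unfold rowf flagf
  rw [hs]
  split_ifs <;> push_cast <;> omega

-- tailf peels its first index when that index belongs to row r
lemma tailf_cons (l : List Char) (N k r : Nat) (hk : k < l.length) (hr : rowf N k = r) :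
    tailf l N k r = l.getD k ' ' :: tailf l N (k+1) r := by
  unfold tailf
  rw [show l.length - k = (l.length - (k+1)) + 1 by omega, List.range'_succ]
  simp [hr]

lemma tailf_skip (l : List Char) (N k r : Nat) (hk : k < l.length) (hr : ¬ rowf N k = r) :
    tailf l N k r = tailf l N (k+1) r := by
  unfold tailf
  rw [show l.length - k = (l.length - (k+1)) + 1 by omega, List.range'_succ]
  simp [hr]

lemma tailf_nil (l : List Char) (N k r : Nat) (hk : l.length ≤ k) :
    tailf l N k r = [] := by
  unfold tailf
  rw [Nat.sub_eq_zero_of_le hk]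
  simp

-- ===== A-side: fold invariant =====
lemma foldA_inv (l : List Char) (N : Nat) (hN : 2 ≤ N) :
    ∀ (fuel k : Nat) (res : List (List Char)), l.length ≤ k + fuel → res.length = N →
      ((l.drop k).foldl (stepA (N:Int)) (res, (rowf N k : Int), flagf N k)).1
        = res.mapIdx (fun r cs => cs ++ tailf l N k r) := by
  intro fuel
  induction fuel with
  | zero =>
    intro k res hk hlen
    rw [List.drop_eq_nil_of_le (by omega), List.foldl_nil]
    apply List.ext_getElem
    · simp
    · intro i h1 h2
      simp [List.getElem_mapIdx, tailf_nil l N k _ (by omega)]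
  | succ fuel ih =>
    intro k res hk hlen
    by_cases hkl : l.length ≤ k
    · rw [List.drop_eq_nil_of_le hkl, List.foldl_nil]
      apply List.ext_getElem
      · simp
      · intro i h1 h2
        simp [List.getElem_mapIdx, tailf_nil l N k _ hkl]
    · have hkl2 : k < l.length := by omega
      rw [List.drop_eq_getElem_cons hkl2, List.foldl_cons]
      have hrow := rowf_lt N k hN
      have hstep : stepA (N:Int) (res, (rowf N k : Int), flagf N k) l[k] =
          (res.set (rowf N k) (res.getD (rowf N k) [] ++ [l[k]]),
            ((rowf N (k+1) : Nat) : Int), flagf N (k+1)) := by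
        simp only [stepA, Int.toNat_natCast]
        rw [← step_row N k hN, ← step_flag N k hN]
      rw [hstep, ih (k+1) _ (by omega) (by simp [hlen])]
      apply List.ext_getElem
      · simp
      · intro r h1 h2
        have hrN : r < N := by simpa [hlen] using h2
        simp only [List.getElem_mapIdx, List.getElem_set]
        by_cases hreq : rowf N k = r
        · subst hreq
          rw [if_pos rfl, List.getD_eq_getElem res [] (by omega),
            tailf_cons l N k _ hkl2 rfl, List.getD_eq_getElem l ' ' hkl2]
          simp
        · rw [if_neg hreq, tailf_skip l N k r hkl2 hreq]

-- ===== B-side =====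
lemma pyRange_nil_of_pos (a b s : Int) (hs : 0 < s) (h : b ≤ a) :
    PySem.List.pyRange a b s = [] := by
  rw [PySem.List.pyRange_of_pos _ _ hs, if_neg (by omega)]
  simp

lemma pyRange_cons_of_pos (a b s : Int) (hs : 0 < s) (h : a < b) :
    PySem.List.pyRange a b s = a :: PySem.List.pyRange (a+s) b s := by
  rw [PySem.List.pyRange_of_pos _ _ hs, PySem.List.pyRange_of_pos _ _ hs, if_pos h]
  have key : (b - a + s - 1) / s = (b - (a+s) + s - 1) / s + 1 := by
    rw [show b - a + s - 1 = (b - (a+s) + s - 1) + 1*s by ring]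
    rw [Int.add_mul_ediv_right _ _ (by omega)]
  by_cases h2 : a + s < b
  · rw [if_pos h2, key]
    have hq : 0 ≤ (b - (a+s) + s - 1) / s := Int.ediv_nonneg (by omega) (by omega)
    rw [show ((b - (a+s) + s - 1) / s + 1).toNat = ((b - (a+s) + s - 1)/s).toNat + 1 by omega]
    rw [List.range_succ_eq_map]
    simp only [List.map_cons, List.map_map, Nat.cast_zero, mul_zero, add_zero, List.cons.injEq]
    refine ⟨trivial, ?_⟩
    apply List.map_congr_left
    intro x _
    simp only [Function.comp_apply, Nat.succ_eq_add_one]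
    push_cast
    ring
  · rw [if_neg h2]
    have h1 : (b - (a+s) + s - 1) / s = 0 := Int.ediv_eq_zero_of_lt (by omega) (by omega)
    rw [key, h1]
    norm_num

-- a filter whose predicate can hold at no more than one place
lemma filter_unique (p : Nat → Bool) (x : Nat) :
    ∀ (L : List Nat), L.Nodup → (∀ i ∈ L, p i = true ↔ i = x) →
      L.filter p = if x ∈ L then [x] else [] := by
  intro L
  induction L with
  | nil => simp
  | cons a t iht =>
    intro hnd hch
    have ha := hch a List.mem_cons_self
    rw [List.filter_cons]
    by_cases hax : a = x
    · subst hax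
      rw [if_pos (ha.mpr rfl)]
      have ht : t.filter p = [] := by
        rw [List.filter_eq_nil_iff]
        intro i hi hpi
        have hix := (hch i (List.mem_cons_of_mem _ hi)).mp hpi
        subst hix
        exact (List.nodup_cons.mp hnd).1 hi
      rw [ht, if_pos List.mem_cons_self]
    · have hpa : ¬ p a = true := fun hp => hax (ha.mp hp)
      rw [if_neg hpa,
        iht (List.nodup_cons.mp hnd).2 (fun i hi => hch i (List.mem_cons_of_mem _ hi))]
      have hmem : (x ∈ a :: t) ↔ (x ∈ t) := by
        constructor
        · intro hx
          rcases List.mem_cons.mp hx with rfl | hx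
          · exact absurd rfl hax
          · exact hx
        · exact List.mem_cons_of_mem _
      simp only [hmem]

-- indices strictly between k and k+cycle that lie on row r
lemma between_char (N k r i : Nat) (hN : 2 ≤ N) (hr : r < N) (hk : k % (2*N-2) = r)
    (hi1 : k + 1 ≤ i) (hi2 : i < k + (2*N-2)) :
    (rowf N i = r) ↔ (0 < r ∧ r + 1 < N ∧ i = k + (2*N-2) - 2*r) := by
  unfold rowf
  have hd1 : i % (2*N-2) = (r + (i - k)) % (2*N-2) := by
    conv_lhs => rw [show i = k + (i - k) by omega, Nat.add_mod, hk]
    rw [Nat.mod_eq_of_lt (show i - k < 2*N-2 by omega)]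
  have hd2 : (r + (i - k)) % (2*N-2)
      = if r + (i-k) < 2*N-2 then r + (i-k) else r + (i-k) - (2*N-2) := by
    split_ifs with hlt2
    · exact Nat.mod_eq_of_lt hlt2
    · rw [Nat.mod_eq_sub_mod (by omega), Nat.mod_eq_of_lt (by omega)]
  rw [hd1, hd2]
  split_ifs <;> omega

-- no index below r lies on row r
lemma rowf_small (N i r : Nat) (hN : 2 ≤ N) (hr : r < N) (hi : i < r) : ¬ rowf N i = r := by
  unfold rowf
  rw [Nat.mod_eq_of_lt (by omega), if_pos (by omega)]
  omega

-- one period of the zigzag, starting at a straight-column index of row r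
lemma tailf_period (l : List Char) (N k r : Nat) (hN : 2 ≤ N) (hr : r < N)
    (hk : k % (2*N-2) = r) (hkn : k < l.length) :
    tailf l N k r =
      l.getD k ' ' ::
        ((if 0 < r ∧ r + 1 < N ∧ k + (2*N-2) - 2*r < l.length
            then [l.getD (k + (2*N-2) - 2*r) ' '] else []) ++ tailf l N (k + (2*N-2)) r) := by
  have hrowk : rowf N k = r := by
    unfold rowf
    rw [hk, if_pos hr]
  rw [tailf_cons l N k r hkn hrowk]
  congr 1
  by_cases hbig : k + (2*N-2) ≤ l.length
  · -- a full period fits before the end of the string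
    unfold tailf
    rw [show l.length - (k+1) = (2*N-2-1) + (l.length - (k+(2*N-2))) by omega,
      ← List.range'_append (s := k+1) (m := 2*N-2-1) (n := l.length - (k+(2*N-2))) (step := 1),
      show k+1+1*(2*N-2-1) = k + (2*N-2) by omega, List.filter_append, List.map_append]
    by_cases hint : 0 < r ∧ r + 1 < N
    · have hchar : ∀ i ∈ List.range' (k+1) (2*N-2-1),
          (decide (rowf N i = r) = true ↔ i = k + (2*N-2) - 2*r) := by
        intro i hi
        have hb := List.mem_range'_1.mp hi
        have hbc := between_char N k r i hN hr hk (by omega) (by omega)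
        simp only [decide_eq_true_eq]
        rw [hbc]
        exact ⟨fun h => h.2.2, fun h => ⟨hint.1, hint.2, h⟩⟩
      rw [filter_unique _ _ _ (List.nodup_range' 1 (by norm_num)) hchar,
        if_pos (List.mem_range'_1.mpr (by omega)),
        if_pos (⟨hint.1, hint.2, by omega⟩ :
          0 < r ∧ r + 1 < N ∧ k + (2*N-2) - 2*r < l.length)]
      simp
    · have hnil : (List.range' (k+1) (2*N-2-1)).filter (fun i => decide (rowf N i = r)) = [] := by
        rw [List.filter_eq_nil_iff]
        intro i hi hpi
        have hb := List.mem_range'_1.mp hi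
        have hbc := (between_char N k r i hN hr hk (by omega) (by omega)).mp
          (by simpa using hpi)
        exact hint ⟨hbc.1, hbc.2.1⟩
      rw [hnil, if_neg (by tauto)]
      simp
  · -- the string ends inside this period
    rw [tailf_nil l N (k + (2*N-2)) r (by omega), List.append_nil]
    unfold tailf
    by_cases hint : 0 < r ∧ r + 1 < N
    · have hchar : ∀ i ∈ List.range' (k+1) (l.length - (k+1)),
          (decide (rowf N i = r) = true ↔ i = k + (2*N-2) - 2*r) := by
        intro i hi
        have hb := List.mem_range'_1.mp hi
        have hbc := between_char N k r i hN hr hk (by omega) (by omega)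
        simp only [decide_eq_true_eq]
        rw [hbc]
        exact ⟨fun h => h.2.2, fun h => ⟨hint.1, hint.2, h⟩⟩
      rw [filter_unique _ _ _ (List.nodup_range' 1 (by norm_num)) hchar]
      by_cases hxn : k + (2*N-2) - 2*r < l.length
      · rw [if_pos (List.mem_range'_1.mpr (by omega)),
          if_pos (⟨hint.1, hint.2, hxn⟩ :
            0 < r ∧ r + 1 < N ∧ k + (2*N-2) - 2*r < l.length)]
        simp
      · rw [if_neg (fun hmem => hxn (by have := List.mem_range'_1.mp hmem; omega)),
          if_neg (by tauto)]
        simp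
    · have hnil : (List.range' (k+1) (l.length - (k+1))).filter
          (fun i => decide (rowf N i = r)) = [] := by
        rw [List.filter_eq_nil_iff]
        intro i hi hpi
        have hb := List.mem_range'_1.mp hi
        have hbc := (between_char N k r i hN hr hk (by omega) (by omega)).mp
          (by simpa using hpi)
        exact hint ⟨hbc.1, hbc.2.1⟩
      rw [hnil, if_neg (by tauto)]
      simp

lemma foldB_row (l : List Char) (N r : Nat) (hN : 2 ≤ N) (hr : r < N) :
    ∀ (fuel k : Nat) (acc : List Char), l.length ≤ k + fuel → k % (2*N-2) = r →
      (PySem.List.pyRange (k:Int) (l.length : Int) (((2*N-2 : Nat)) : Int)).foldl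
          (innerB l (N:Int) (((2*N-2 : Nat)) : Int) (r:Int)) acc
        = acc ++ tailf l N k r := by
  intro fuel
  induction fuel with
  | zero =>
    intro k acc hf hk
    rw [pyRange_nil_of_pos _ _ _ (by omega) (by omega), List.foldl_nil,
      tailf_nil l N k r (by omega)]
    exact (List.append_nil acc).symm
  | succ fuel ih =>
    intro k acc hf hk
    by_cases hkn : l.length ≤ k
    · rw [pyRange_nil_of_pos _ _ _ (by omega) (by omega), List.foldl_nil,
        tailf_nil l N k r hkn]
      exact (List.append_nil acc).symm
    · have hkn2 : k < l.length := by omega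
      rw [pyRange_cons_of_pos _ _ _ (by omega) (by omega), List.foldl_cons]
      rw [show (k:Int) + ((2*N-2 : Nat) : Int) = ((k + (2*N-2) : Nat) : Int) by push_cast; ring]
      have hinner : innerB l (N:Int) (((2*N-2 : Nat)) : Int) (r:Int) acc (k:Int)
          = acc ++ (l.getD k ' ' ::
              (if 0 < r ∧ r + 1 < N ∧ k + (2*N-2) - 2*r < l.length
                then [l.getD (k + (2*N-2) - 2*r) ' '] else [])) := by
        simp only [innerB, PySem.List.pyGetD_natCast]
        by_cases hint : 0 < r ∧ r + 1 < N ∧ k + (2*N-2) - 2*r < l.length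
        · rw [if_pos (by omega : (0:Int) < (r:Int) ∧ (r:Int) < (N:Int) - 1
              ∧ (k:Int) + ((2*N-2 : Nat) : Int) - 2*(r:Int) < (l.length : Int))]
          rw [show (k:Int) + ((2*N-2 : Nat) : Int) - 2*(r:Int)
              = ((k + (2*N-2) - 2*r : Nat) : Int) by omega]
          rw [PySem.List.pyGetD_natCast, if_pos hint]
          simp
        · rw [if_neg (by omega : ¬ ((0:Int) < (r:Int) ∧ (r:Int) < (N:Int) - 1
              ∧ (k:Int) + ((2*N-2 : Nat) : Int) - 2*(r:Int) < (l.length : Int)))]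
          rw [if_neg hint]
      rw [hinner, ih (k + (2*N-2)) _ (by omega) (by rw [Nat.add_mod_right]; exact hk)]
      rw [tailf_period l N k r hN hr hk hkn2]
      simp

-- row r starts at index r
lemma tailf_zero_eq (l : List Char) (N r : Nat) (hN : 2 ≤ N) (hr : r < N) :
    tailf l N 0 r = tailf l N r r := by
  by_cases hrn : r ≤ l.length
  · unfold tailf
    rw [Nat.sub_zero]
    have hsplit : List.range' 0 l.length
        = List.range' 0 r ++ List.range' r (l.length - r) := by
      rw [show l.length = r + (l.length - r) by omega,
        ← List.range'_append (s := 0) (m := r) (n := l.length - r) (step := 1),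
        show 0+1*r = r by ring]
      congr 2
      omega
    rw [hsplit, List.filter_append]
    have hnil : (List.range' 0 r).filter (fun i => decide (rowf N i = r)) = [] := by
      rw [List.filter_eq_nil_iff]
      intro i hi hpi
      have hb := List.mem_range'_1.mp hi
      exact rowf_small N i r hN hr (by omega) (by simpa using hpi)
    rw [hnil, List.nil_append]
  · rw [tailf_nil l N r r (by omega)]
    unfold tailf
    rw [List.map_eq_nil_iff, List.filter_eq_nil_iff]
    intro i hi hpi
    have hb := List.mem_range'_1.mp hi
    exact rowf_small N i r hN hr (by omega) (by simpa using hpi)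

lemma A_main (l : List Char) (N : Nat) (hN : 2 ≤ N) :
    (l.foldl (stepA (N:Int)) ((List.range N).map (fun _ => ([] : List Char)), 0, 1)).1
      = (List.range N).map (fun r => tailf l N 0 r) := by
  rw [show (((List.range N).map (fun _ => ([] : List Char)) : List (List Char)), (0:Int), (1:Int))
      = ((List.range N).map (fun _ => ([] : List Char)), ((rowf N 0 : Nat) : Int), flagf N 0) by
    rw [rowf_zero N hN, flagf_zero N hN]
    norm_num]
  have h := foldA_inv l N hN l.length 0 ((List.range N).map fun _ => []) (by omega) (by simp)
  rw [List.drop_zero] at h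
  rw [h]
  apply List.ext_getElem
  · simp
  · intro r h1 h2
    simp [List.getElem_mapIdx]

lemma B_main (l : List Char) (N : Nat) (hN : 2 ≤ N) :
    (PySem.List.pyRange 0 (N:Int) 1).foldl
        (fun acc r =>
          (PySem.List.pyRange r (l.length : Int) (2*(N:Int)-2)).foldl
            (innerB l (N:Int) (2*(N:Int)-2) r) acc) []
      = ((List.range N).map (fun r => tailf l N 0 r)).flatten := by
  rw [PySem.List.pyRange_one 0 (N:Int)]
  simp only [Int.sub_zero, Int.toNat_natCast, zero_add]
  rw [List.foldl_map]
  rw [PySem.List.foldl_congr_mem _ _ (fun acc r => acc ++ tailf l N 0 r) _ ?_]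
  · rw [PySem.List.foldl_append_eq_flatMap, List.flatMap_def, List.nil_append]
  · intro acc r hrm
    have hr : r < N := List.mem_range.mp hrm
    have hcyc : (2*(N:Int)-2) = ((2*N-2 : Nat) : Int) := by omega
    rw [hcyc]
    rw [foldB_row l N r hN hr l.length r acc (by omega) (Nat.mod_eq_of_lt (by omega))]
    simp [tailf_zero_eq l N r hN hr]

-- ===== VERDICT (by name: the statement is the Claim_ definition above) =====
theorem convert_spec : Claim_equal_convert := by
  intro s numRows _dom
  unfold Spec_convert convert convert_alt
  by_cases hlt : numRows < 2
  · rw [if_pos hlt, if_pos hlt]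
  · obtain ⟨N, rfl⟩ := Int.eq_ofNat_of_zero_le (show (0:Int) ≤ numRows by omega)
    have hN : 2 ≤ N := by omega
    simp only [if_neg hlt, Int.toNat_natCast]
    rw [A_main s.toList N hN, B_main s.toList N hN]
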